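-- pv_equiv track=rewrite | github.com/Noya-G/Video2Mesh | chooseFrames.py | longest_subarray_with_value
-- ===== SOURCE A (Python) =====
-- def longest_subarray_with_value(lst):
--
--     if not lst:
--         return []
--
--     n = len(lst)
--     dp = [0] * n
--     max_length = 0
--     end_index = 0
--
--     for i in range(n):
--         if lst[i][2] == 4:
--             dp[i] = dp[i - 1] + 1 if i > 0 else 1
--             if dp[i] > max_length:
--                 max_length = dp[i]
--                 end_index = i
--
--     start_index = end_index - max_length + 1
--     return lst[start_index:end_index + 1]
-- ===== SOURCE B (Python) =====
-- def longest_subarray_with_value(lst):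
--     # Decompose into maximal runs of rows with row[2] == 4, then take the
--     # first run of maximum length (strict > keeps the earliest winner).
--     runs = []  # (start_index, length)
--     i = 0
--     n = len(lst)
--     while i < n:
--         if lst[i][2] == 4:
--             j = i
--             while j < n and lst[j][2] == 4:
--                 j += 1
--             runs.append((i, j - i))
--             i = j
--         else:
--             i += 1
--     best_start, best_len = 0, 0
--     for s, L in runs:
--         if L > best_len:
--             best_start, best_len = s, L
--     return lst[best_start:best_start + best_len]
-- ===== Notes on version B (the rewrite author's own statement) =====
-- stated objective: alternative
-- what changed: Replaces the dp-array scan (a length-n dp table with max/end-index bookkeeping and a slice reconstructed from end_index) by a run decomposition: split the list into maximal contiguous runs of rows with row[2]==4, pick the first run of maximum length, and slice it out directly.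
import Mathlib
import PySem

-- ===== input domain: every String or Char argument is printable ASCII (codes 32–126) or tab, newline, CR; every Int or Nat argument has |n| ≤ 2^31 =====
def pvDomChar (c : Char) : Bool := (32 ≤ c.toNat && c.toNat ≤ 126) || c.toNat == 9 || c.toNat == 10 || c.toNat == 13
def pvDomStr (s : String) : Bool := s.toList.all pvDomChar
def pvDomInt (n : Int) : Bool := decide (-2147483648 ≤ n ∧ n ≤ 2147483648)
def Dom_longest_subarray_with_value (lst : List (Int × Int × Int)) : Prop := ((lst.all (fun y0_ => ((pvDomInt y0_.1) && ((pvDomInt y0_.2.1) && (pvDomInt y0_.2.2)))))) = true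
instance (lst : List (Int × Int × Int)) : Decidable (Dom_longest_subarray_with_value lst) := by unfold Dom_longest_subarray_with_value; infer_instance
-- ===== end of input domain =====

-- B replaces A's dp-array scan by a decomposition into maximal runs of rows with row[2]==4
-- followed by a first-max pick (alternative algorithm, same O(n) cost).


-- ===== PORT A =====
-- A's loop body: state is (dp, max_length, end_index); the pyGet? match only totalises
-- the in-range access lst[i].
def pvStepA (lst : List (Int × Int × Int)) (s : List Int × Int × Int) (i : Int) :
    List Int × Int × Int :=
  match PySem.List.pyGet? lst i with
  | none => s
  | some t =>
    if t.2.2 = 4 then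
      let v : Int := if i > 0 then PySem.List.pyGetD s.1 (i - 1) 0 + 1 else 1
      let dp' := PySem.List.pySetD s.1 i v
      if v > s.2.1 then (dp', v, i) else (dp', s.2.1, s.2.2)
    else s

def longest_subarray_with_value (lst : List (Int × Int × Int)) : List (Int × Int × Int) :=
  if lst = [] then []
  else
    let n : Int := PySem.List.len lst
    let dp0 : List Int := List.replicate lst.length 0
    let st := (PySem.List.pyRange 0 n 1).foldl (pvStepA lst) (dp0, 0, 0)
    let start_index := st.2.2 - st.2.1 + 1
    PySem.List.slice lst (some start_index) (some (st.2.2 + 1))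

-- ===== PORT B =====
-- the outer while-loop of B: the list of maximal runs (start, length); the inner
-- 'while j < n and lst[j][2] == 4' is the takeWhile/dropWhile of the matching prefix
def pvRunsB : List (Int × Int × Int) → Int → List (Int × Int)
  | [], _ => []
  | x :: xs, i =>
    if x.2.2 = 4 then
      let run := (x :: xs).takeWhile (fun t => t.2.2 = 4)
      (i, (run.length : Int)) ::
        pvRunsB ((x :: xs).dropWhile (fun t => t.2.2 = 4)) (i + run.length)
    else pvRunsB xs (i + 1)
termination_by xs _ => xs.length
decreasing_by
  · rename_i h
    simp only [List.dropWhile_cons]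
    split_ifs with h2
    · exact Nat.lt_succ_of_le (List.length_dropWhile_le _ _)
    · exact absurd (by simpa using h) h2
  · simp

def longest_subarray_with_value_alt (lst : List (Int × Int × Int)) : List (Int × Int × Int) :=
  let runs := pvRunsB lst 0
  let best := runs.foldl (fun (b : Int × Int) r => if r.2 > b.2 then r else b) (0, 0)
  PySem.List.slice lst (some best.1) (some (best.1 + best.2))

-- ===== PRECONDITION & SPEC =====
def Spec_longest_subarray_with_value (lst : List (Int × Int × Int)) (out : List (Int × Int × Int)) : Prop := out = longest_subarray_with_value_alt lst
instance (lst : List (Int × Int × Int)) (out : List (Int × Int × Int)) : Decidable (Spec_longest_subarray_with_value lst out) := by unfold Spec_longest_subarray_with_value; infer_instance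

-- ===== CLAIM (what is proved, stated in full; the proofs are below) =====
def Claim_equal_longest_subarray_with_value : Prop := ∀ (lst : List (Int × Int × Int)), Dom_longest_subarray_with_value lst → Spec_longest_subarray_with_value lst (longest_subarray_with_value lst)

-- ===== LEMMAS AND PROOFS =====

-- canonical single pass: (current run length, best length, best end index)
def pvScan : List (Int × Int × Int) → Int → Int → Int → Int → Int × Int
  | [], _, _, m, e => (m, e)
  | x :: xs, i, cur, m, e =>
    if x.2.2 = 4 then
      if cur + 1 > m then pvScan xs (i + 1) (cur + 1) (cur + 1) i
      else pvScan xs (i + 1) (cur + 1) m e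
    else pvScan xs (i + 1) 0 m e

-- A's fold computes pvScan: dp only matters through dp[k-1] (= cur) and the zeros ahead
theorem pvA_eq_scan (lst : List (Int × Int × Int)) :
    ∀ (suf : List (Int × Int × Int)) (k : Nat) (dp : List Int) (cur m e : Int),
      lst.drop k = suf →
      dp.length = lst.length →
      (k = 0 → cur = 0) →
      (0 < k → PySem.List.pyGetD dp ((k : Int) - 1) 0 = cur) →
      (∀ j : Nat, k ≤ j → j < lst.length → dp.getD j 0 = 0) →
      ((PySem.List.pyRange (k : Int) (lst.length : Int) 1).foldl (pvStepA lst) (dp, m, e)).2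
        = pvScan suf (k : Int) cur m e := by
  intro suf
  induction suf generalizing lst with
  | nil =>
    intro k dp cur m e hdrop _ _ _ _
    have hk : lst.length ≤ k := by
      by_contra h
      have h2 := List.drop_eq_nil_iff.mp hdrop
      omega
    rw [PySem.List.pyRange_one_eq_nil (by exact_mod_cast hk)]
    rfl
  | cons x rest ihr =>
    intro k dp cur m e hdrop hlen hc0 hcur hzero
    have hk : k < lst.length := by
      by_contra h
      rw [List.drop_eq_nil_iff.mpr (by omega)] at hdrop
      exact absurd hdrop (by simp)
    have hx? : lst[k]? = some x := by
      have h2 : (lst.drop k)[0]? = some x := by rw [hdrop]; rfl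
      simpa [List.getElem?_drop] using h2
    have hx : lst[k]'hk = x := by
      have := List.getElem?_eq_getElem hk
      rw [hx?] at this; exact (Option.some.inj this).symm
    have hdrop' : lst.drop (k + 1) = rest := by
      rw [← List.tail_drop, hdrop]; rfl
    have hget : PySem.List.pyGet? lst (k : Int) = some x := by
      rw [PySem.List.pyGet?_natCast, hx?]
    have hcast1 : ((k : Int) + 1) = (((k + 1 : Nat)) : Int) := by push_cast; ring
    have hcast2 : (((k + 1 : Nat)) : Int) - 1 = ((k : Nat) : Int) := by push_cast; ring
    rw [PySem.List.pyRange_one_cons (by exact_mod_cast hk), List.foldl_cons]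
    by_cases hx4 : x.2.2 = 4
    · have hv : (if (k : Int) > 0 then PySem.List.pyGetD dp ((k : Int) - 1) 0 + 1 else 1)
          = cur + 1 := by
        by_cases hk0 : k = 0
        · subst hk0
          rw [if_neg (by norm_num)]
          have := hc0 rfl
          omega
        · rw [if_pos (by exact_mod_cast Nat.pos_of_ne_zero hk0),
            hcur (Nat.pos_of_ne_zero hk0)]
      simp only [pvStepA, hget, pvScan, hx4, if_true, hv,
        PySem.List.pySetD_natCast]
      have hlen' : (dp.set k (cur + 1)).length = lst.length := by simp [hlen]
      have hread : PySem.List.pyGetD (dp.set k (cur + 1)) (((k + 1 : Nat) : Int) - 1) 0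
          = cur + 1 := by
        rw [hcast2, PySem.List.pyGetD_natCast]
        simp [List.getD, hlen ▸ hk]
      have hzero' : ∀ j : Nat, k + 1 ≤ j → j < lst.length → (dp.set k (cur + 1)).getD j 0 = 0 := by
        intro j hj1 hj2
        simp only [List.getD]
        rw [List.getElem?_set_ne (by omega)]
        exact hzero j (by omega) hj2
      by_cases hm : cur + 1 > m
      · rw [if_pos hm, if_pos hm, hcast1]
        exact ihr lst (k + 1) _ (cur + 1) (cur + 1) (k : Int) hdrop' hlen'
          (by omega) (fun _ => hread) hzero'
      · rw [if_neg hm, if_neg hm, hcast1]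
        exact ihr lst (k + 1) _ (cur + 1) m e hdrop' hlen'
          (by omega) (fun _ => hread) hzero'
    · simp only [pvStepA, hget, pvScan, hx4, if_false]
      rw [hcast1]
      exact ihr lst (k + 1) dp 0 m e hdrop' hlen (by omega)
        (fun _ => by
          rw [hcast2, PySem.List.pyGetD_natCast]
          exact hzero k le_rfl hk) (fun j hj hj2 => hzero j (by omega) hj2)

-- pvScan over a block of matching rows, entered with cur ≤ m
theorem pvScan_congr (l : List (Int × Int × Int)) {a a' b b' c c' d d' : Int}
    (ha : a = a') (hb : b = b') (hc : c = c') (hd : d = d') :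
    pvScan l a b c d = pvScan l a' b' c' d' := by subst ha hb hc hd; rfl

theorem pvScan_run :
    ∀ (run : List (Int × Int × Int)), (∀ x ∈ run, x.2.2 = 4) →
    ∀ (rest : List (Int × Int × Int)) (i cur m e : Int), cur ≤ m →
      pvScan (run ++ rest) i cur m e =
        pvScan rest (i + run.length) (cur + run.length)
          (if cur + run.length > m then cur + run.length else m)
          (if cur + run.length > m then i + run.length - 1 else e) := by
  intro run
  induction run with
  | nil =>
    intro _ rest i cur m e hcm
    simp only [List.nil_append, List.length_nil, Nat.cast_zero, add_zero]
    rw [if_neg (by omega), if_neg (by omega)]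
  | cons x r ih =>
    intro hrun rest i cur m e hcm
    have hx : x.2.2 = 4 := hrun x (List.mem_cons_self)
    have hr : ∀ y ∈ r, y.2.2 = 4 := fun y hy => hrun y (List.mem_cons_of_mem _ hy)
    simp only [List.cons_append, pvScan, hx, if_true]
    by_cases h1 : cur + 1 > m
    · rw [if_pos (by exact_mod_cast h1)]
      rw [ih hr rest (i + 1) (cur + 1) (cur + 1) i le_rfl]
      apply pvScan_congr <;> simp only [List.length_cons] <;> push_cast <;> (try split_ifs) <;> omega
    · rw [if_neg (by exact_mod_cast h1)]
      rw [ih hr rest (i + 1) (cur + 1) m e (by omega)]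
      apply pvScan_congr <;> simp only [List.length_cons] <;> push_cast <;> (try split_ifs) <;> omega

-- B's fold over the runs tracks pvScan's (best length, best end index)
theorem pvRuns_eq_scan :
    ∀ (N : Nat) (xs : List (Int × Int × Int)), xs.length ≤ N →
    ∀ (i s m e : Int),
      ((m = 0 ∧ s = 0 ∧ e = 0) ∨ (0 < m ∧ s = e - m + 1)) →
      ((pvRunsB xs i).foldl (fun (b : Int × Int) r => if r.2 > b.2 then r else b) (s, m)).2
          = (pvScan xs i 0 m e).1 ∧
      (((pvScan xs i 0 m e).1 = 0 ∧
          ((pvRunsB xs i).foldl (fun (b : Int × Int) r => if r.2 > b.2 then r else b) (s, m)).1 = 0 ∧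
          (pvScan xs i 0 m e).2 = 0) ∨
        (0 < (pvScan xs i 0 m e).1 ∧
          ((pvRunsB xs i).foldl (fun (b : Int × Int) r => if r.2 > b.2 then r else b) (s, m)).1
            = (pvScan xs i 0 m e).2 - (pvScan xs i 0 m e).1 + 1)) := by
  intro N
  induction N with
  | zero =>
    intro xs hxs i s m e hinv
    have hx : xs = [] := List.eq_nil_of_length_eq_zero (by omega)
    subst hx
    simp only [pvRunsB, pvScan, List.foldl_nil]
    exact ⟨by simp, by rcases hinv with ⟨h1, h2, h3⟩ | ⟨h1, h2⟩ <;> [left; right] <;> omega⟩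
  | succ N ihN =>
    intro xs hxs i s m e hinv
    have hm0 : (0 : Int) ≤ m := by rcases hinv with ⟨h1, _, _⟩ | ⟨h1, _⟩ <;> omega
    match xs with
    | [] =>
      simp only [pvRunsB, pvScan, List.foldl_nil]
      exact ⟨by simp, by rcases hinv with ⟨h1, h2, h3⟩ | ⟨h1, h2⟩ <;> [left; right] <;> omega⟩
    | x :: xs' =>
      by_cases hx4 : x.2.2 = 4
      · have hrun_all : ∀ y ∈ (x :: xs').takeWhile (fun t => t.2.2 = 4), y.2.2 = 4 := by
          intro y hy
          have h2 := List.mem_takeWhile_imp hy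
          simpa using h2
        have hsplit : (x :: xs').takeWhile (fun t => t.2.2 = 4)
            ++ (x :: xs').dropWhile (fun t => t.2.2 = 4) = x :: xs' :=
          List.takeWhile_append_dropWhile
        have hrun_cons : (x :: xs').takeWhile (fun t => t.2.2 = 4)
            = x :: xs'.takeWhile (fun t => t.2.2 = 4) := by
          simp [hx4]
        have hL : 1 ≤ ((x :: xs').takeWhile (fun t => t.2.2 = 4)).length := by
          rw [hrun_cons]; simp
        have hscan : pvScan (x :: xs') i 0 m e
            = pvScan ((x :: xs').dropWhile (fun t => t.2.2 = 4))
                (i + ((x :: xs').takeWhile (fun t => t.2.2 = 4)).length)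
                (((x :: xs').takeWhile (fun t => t.2.2 = 4)).length : Int)
                (if (((x :: xs').takeWhile (fun t => t.2.2 = 4)).length : Int) > m
                  then (((x :: xs').takeWhile (fun t => t.2.2 = 4)).length : Int) else m)
                (if (((x :: xs').takeWhile (fun t => t.2.2 = 4)).length : Int) > m
                  then i + ((x :: xs').takeWhile (fun t => t.2.2 = 4)).length - 1 else e) := by
          conv_lhs => rw [← hsplit]
          rw [pvScan_run _ hrun_all _ i 0 m e hm0]
          simp
        have hruns : pvRunsB (x :: xs') i
            = (i, (((x :: xs').takeWhile (fun t => t.2.2 = 4)).length : Int))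
              :: pvRunsB ((x :: xs').dropWhile (fun t => t.2.2 = 4))
                  (i + ((x :: xs').takeWhile (fun t => t.2.2 = 4)).length) := by
          rw [pvRunsB]
          simp [hx4]
        have hlen2 : ((x :: xs').dropWhile (fun t => t.2.2 = 4)).length ≤ N := by
          have h2 : (((x :: xs').takeWhile (fun t => t.2.2 = 4))
              ++ (x :: xs').dropWhile (fun t => t.2.2 = 4)).length = xs'.length + 1 := by
            rw [hsplit]; rfl
          rw [List.length_append] at h2
          simp only [List.length_cons] at hxs
          omega
        rcases hR : (x :: xs').dropWhile (fun t => t.2.2 = 4) with _ | ⟨y, r2⟩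
        · rw [hR] at hscan hlen2
          rw [hscan, hruns, hR, List.foldl_cons]
          simp only [pvRunsB, List.foldl_nil, pvScan]
          by_cases hLm : ((((x :: xs').takeWhile (fun t => t.2.2 = 4)).length : Nat) : Int) > m
          · simp only [if_pos hLm]
            exact ⟨trivial, Or.inr ⟨by exact_mod_cast hL, by omega⟩⟩
          · simp only [if_neg hLm]
            exact ⟨trivial, by rcases hinv with ⟨h1, h2, h3⟩ | ⟨h1, h2⟩ <;> [left; right] <;> omega⟩
        · have hy4 : ¬ (y.2.2 = 4) := by
            have h2 := List.head_dropWhile_not (fun t => decide (t.2.2 = 4))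
              (l := x :: xs') (by rw [hR]; simp)
            simp only [hR, List.head_cons] at h2
            simpa using h2
          rw [hR] at hscan hlen2
          have hruns2 : pvRunsB (y :: r2)
              (i + (((x :: xs').takeWhile (fun t => t.2.2 = 4)).length : Int))
              = pvRunsB r2
                  (i + (((x :: xs').takeWhile (fun t => t.2.2 = 4)).length : Int) + 1) := by
            rw [pvRunsB]; simp [hy4]
          have hscan2 : ∀ M E : Int, pvScan (y :: r2)
              (i + (((x :: xs').takeWhile (fun t => t.2.2 = 4)).length : Int))
              ((((x :: xs').takeWhile (fun t => t.2.2 = 4)).length : Nat) : Int) M E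
              = pvScan r2
                  (i + (((x :: xs').takeWhile (fun t => t.2.2 = 4)).length : Int) + 1) 0 M E := by
            intro M E; simp [pvScan, hy4]
          rw [hscan, hscan2, hruns, hR, hruns2, List.foldl_cons]
          have hlen3 : r2.length ≤ N := by
            simp only [List.length_cons] at hlen2; omega
          by_cases hLm : ((((x :: xs').takeWhile (fun t => t.2.2 = 4)).length : Nat) : Int) > m
          · simp only [if_pos hLm]
            exact ihN r2 hlen3
              (i + (((x :: xs').takeWhile (fun t => t.2.2 = 4)).length : Int) + 1) i
              ((((x :: xs').takeWhile (fun t => t.2.2 = 4)).length : Nat) : Int)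
              (i + (((x :: xs').takeWhile (fun t => t.2.2 = 4)).length : Int) - 1)
              (Or.inr ⟨by exact_mod_cast hL, by omega⟩)
          · simp only [if_neg hLm]
            exact ihN r2 hlen3
              (i + (((x :: xs').takeWhile (fun t => t.2.2 = 4)).length : Int) + 1) s m e hinv
      · have hruns : pvRunsB (x :: xs') i = pvRunsB xs' (i + 1) := by
          rw [pvRunsB]; simp [hx4]
        have hscan : pvScan (x :: xs') i 0 m e = pvScan xs' (i + 1) 0 m e := by
          simp [pvScan, hx4]
        rw [hruns, hscan]
        exact ihN xs' (by simpa using Nat.le_of_succ_le_succ hxs) (i + 1) s m e hinv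

-- ===== VERDICT (by name: the statement is the Claim_ definition above) =====
theorem longest_subarray_with_value_spec : Claim_equal_longest_subarray_with_value := by
  intro lst _
  unfold Spec_longest_subarray_with_value
  by_cases hnil : lst = []
  · subst hnil
    norm_num [longest_subarray_with_value, longest_subarray_with_value_alt, pvRunsB,
      PySem.List.slice_to]
  · simp only [longest_subarray_with_value, longest_subarray_with_value_alt, if_neg hnil,
      PySem.List.len_eq]
    have hA := pvA_eq_scan lst lst 0 (List.replicate lst.length 0) 0 0 0
      List.drop_zero (List.length_replicate) (fun _ => rfl)
      (fun h => absurd h (by omega)) (fun j _ _ => by simp [List.getD])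
    push_cast at hA
    obtain ⟨hB1, hB2⟩ := pvRuns_eq_scan lst.length lst le_rfl 0 0 0 0 (Or.inl ⟨rfl, rfl, rfl⟩)
    rw [hA]
    rcases hB2 with ⟨hP1, hF1, hP2⟩ | ⟨hpos, hF1⟩
    · rw [hB1, hF1, hP1, hP2]
      trans ([] : List (Int × Int × Int))
      · norm_num [PySem.List.slice_toNat]
      · symm
        norm_num [PySem.List.slice_to]
    · rw [hB1, hF1]
      have h2 : (pvScan lst 0 0 0 0).2 + 1
          = (pvScan lst 0 0 0 0).2 - (pvScan lst 0 0 0 0).1 + 1 + (pvScan lst 0 0 0 0).1 := by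
        omega
      rw [h2]
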